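-- pv_equiv track=rewrite | github.com/baicai-1145/vllm-GPT-SoVITS | vllm_omni/model_executor/models/gpt_sovits/runtime_lib/GPT_SoVITS/TTS_infer_pack/text_cpu_preprocess.py | _merge_direct_and_resolved_specs
-- ===== SOURCE A (Python) =====
-- from typing import Dict, List, Optional, Sequence, Tuple
--
-- def _merge_direct_and_resolved_specs(
--     direct_specs: Sequence[Tuple[str, str] | None],
--     resolved_specs: Sequence[List[Tuple[str, str]]],
-- ) -> Tuple[List[str], List[str]]:
--     merged_specs: List[Tuple[str, str]] = []
--     resolved_index = 0
--     for spec in direct_specs: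
--         if spec is None:
--             merged_specs.extend(resolved_specs[resolved_index])
--             resolved_index += 1
--             continue
--         merged_specs.append(spec)
--     return _merge_segment_specs(merged_specs)
--
-- def _merge_segment_specs(
--     specs: Sequence[Tuple[str, str]],
-- ) -> Tuple[List[str], List[str]]:
--     textlist: List[str] = []
--     langlist: List[str] = []
--     for text, lang in specs:
--         if not text:
--             continue
--         if langlist and langlist[-1] == lang:
--             textlist[-1] += text
--             continue
--         textlist.append(text)
--         langlist.append(lang)
--     return textlist, langlist
-- ===== SOURCE B (Python) =====
-- from typing import List, Optional, Sequence, Tuple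
--
--
-- def _merge_direct_and_resolved_specs(
--     direct_specs: Sequence[Tuple[str, str] | None],
--     resolved_specs: Sequence[List[Tuple[str, str]]],
-- ) -> Tuple[List[str], List[str]]:
--     resolved_iter = iter(resolved_specs)
--     flat: List[Tuple[str, str]] = []
--     for spec in direct_specs:
--         flat.extend(next(resolved_iter) if spec is None else [spec])
--     segments = [(t, l) for (t, l) in flat if t]
--     textlist: List[str] = []
--     langlist: List[str] = []
--     n = len(segments)
--     i = 0
--     while i < n:
--         lang = segments[i][1]
--         j = i
--         while j < n and segments[j][1] == lang:
--             j += 1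
--         textlist.append("".join(t for t, _ in segments[i:j]))
--         langlist.append(lang)
--         i = j
--     return textlist, langlist
-- ===== Notes on version B (the rewrite author's own statement) =====
-- stated objective: alternative
-- what changed: Replaces A's single online accumulator loop (which mutates the last textlist entry) by: flatten via an explicit iterator over resolved_specs, materialize the non-empty segments, then a two-pointer while loop that scans each maximal same-language run [i:j] and emits the joined slice per run.
import Mathlib
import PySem

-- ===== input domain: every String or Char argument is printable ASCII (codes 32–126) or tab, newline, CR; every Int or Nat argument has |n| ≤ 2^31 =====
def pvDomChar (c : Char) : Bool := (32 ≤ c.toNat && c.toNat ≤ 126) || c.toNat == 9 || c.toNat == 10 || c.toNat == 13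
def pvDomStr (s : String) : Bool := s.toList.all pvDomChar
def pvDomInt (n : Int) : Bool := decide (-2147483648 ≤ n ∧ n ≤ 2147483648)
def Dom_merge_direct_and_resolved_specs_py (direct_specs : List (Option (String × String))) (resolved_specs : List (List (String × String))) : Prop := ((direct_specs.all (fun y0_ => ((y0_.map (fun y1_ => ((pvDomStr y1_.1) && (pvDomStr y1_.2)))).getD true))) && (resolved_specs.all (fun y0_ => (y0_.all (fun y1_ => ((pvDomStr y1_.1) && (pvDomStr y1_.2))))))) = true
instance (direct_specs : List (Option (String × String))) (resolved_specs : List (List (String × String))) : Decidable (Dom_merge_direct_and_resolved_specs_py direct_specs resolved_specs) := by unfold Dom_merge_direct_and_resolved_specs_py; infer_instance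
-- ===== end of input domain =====

-- B replaces A's single online accumulator loop (mutating the last textlist entry) by a
-- staged algorithm: flatten via an explicit iterator, materialize the non-empty segments,
-- then a two-pointer while loop emitting one joined slice per maximal same-language run
-- ('alternative' objective); equal return value on Pre_.

-- ===== PORT A =====
-- A's inner loop body (_merge_segment_specs): skip empty text, extend last entry on
-- same language, else append.  'textlist[-1] += text' is ported as dropLast ++ [last ++ text].
def pvStepA (acc : List String × List String) (p : String × String) : List String × List String :=
  if p.1 = "" then acc
  else if acc.2 ≠ [] ∧ acc.2.getLast? = some p.2 then
    (acc.1.dropLast ++ [acc.1.getLast?.getD "" ++ p.1], acc.2)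
  else (acc.1 ++ [p.1], acc.2 ++ [p.2])

-- A's first loop: merged_specs/resolved_index accumulator.  resolved_specs[resolved_index]
-- raises IndexError when out of range: pyGet? is none there (excluded by Pre_), getD [] keeps the port total.
def pvStepFlatA (resolved_specs : List (List (String × String))) (st : List (String × String) × Int) (spec : Option (String × String)) : List (String × String) × Int :=
  match spec with
  | none => (st.1 ++ ((PySem.List.pyGet? resolved_specs st.2).getD []), st.2 + 1)
  | some s => (st.1 ++ [s], st.2)

def merge_direct_and_resolved_specs_py (direct_specs : List (Option (String × String))) (resolved_specs : List (List (String × String))) : List String × List String :=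
  let st := direct_specs.foldl (pvStepFlatA resolved_specs) ([], 0)
  st.1.foldl pvStepA ([], [])

-- ===== PORT B =====
-- B's flattening loop: 'next(resolved_iter)' consumes the resolved lists one by one;
-- the iterator is the remaining-suffix argument.  When the iterator is exhausted Python
-- raises StopIteration (excluded by Pre_); the port skips there to stay total.
def pvFlatB : List (Option (String × String)) → List (List (String × String)) → List (String × String)
  | [], _ => []
  | none :: rest, [] => pvFlatB rest []
  | none :: rest, r :: rs => r ++ pvFlatB rest rs
  | some s :: rest, rs => s :: pvFlatB rest rs

-- ''.join(t for t, _ in g) (left fold, as ''.join concatenates left to right).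
def pvJoinB (g : List (String × String)) : String := (g.map Prod.fst).foldl (· ++ ·) ""

-- B's inner while loop: advance j while segments[j][1] == lang.
def pvScanJ (segs : List (String × String)) (key : String) (j : Nat) : Nat :=
  if h : j < segs.length ∧ (segs.getD j ("", "")).2 == key then pvScanJ segs key (j + 1) else j
termination_by segs.length - j
decreasing_by omega

-- pvScanJ never moves backwards (needed by pvOuter's termination).
theorem pvScanJ_ge (segs : List (String × String)) (key : String) (j : Nat) : j ≤ pvScanJ segs key j := by
  induction j using pvScanJ.induct segs key with
  | case1 j h ih => rw [pvScanJ, dif_pos h]; omega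
  | case2 j h => rw [pvScanJ, dif_neg h]

-- Starting the scan at i with i's own key always advances past i.
theorem pvScanJ_start_succ_le (segs : List (String × String)) (i : Nat) (hi : i < segs.length) :
    i + 1 ≤ pvScanJ segs (segs.getD i ("", "")).2 i := by
  rw [pvScanJ]
  have h : i < segs.length ∧ ((segs.getD i ("", "")).2 == (segs.getD i ("", "")).2) = true := ⟨hi, by simp⟩
  simp only [h]
  exact pvScanJ_ge _ _ _

-- B's outer while loop: per run, append the joined slice segments[i:j] and the language.
def pvOuter (segs : List (String × String)) (i : Nat) (ts ls : List String) : List String × List String :=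
  if hi : i < segs.length then
    let lang := (segs.getD i ("", "")).2
    let j := pvScanJ segs lang i
    pvOuter segs j (ts ++ [pvJoinB (PySem.List.slice segs (some (i : Int)) (some (j : Int)))]) (ls ++ [lang])
  else (ts, ls)
termination_by segs.length - i
decreasing_by
  have := pvScanJ_start_succ_le segs i hi
  omega

def merge_direct_and_resolved_specs_py_alt (direct_specs : List (Option (String × String))) (resolved_specs : List (List (String × String))) : List String × List String :=
  let segments := (pvFlatB direct_specs resolved_specs).filter (fun p => p.1 ≠ "")
  pvOuter segments 0 [] []

-- ===== PRECONDITION & SPEC =====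
-- Pre_ excludes exactly the inputs on which Python A raises IndexError: more None
-- entries in direct_specs than lists in resolved_specs (B's Python raises StopIteration there).
def Pre_merge_direct_and_resolved_specs_py (direct_specs : List (Option (String × String))) (resolved_specs : List (List (String × String))) : Prop :=
  direct_specs.countP (fun s => s.isNone) ≤ resolved_specs.length
instance (direct_specs : List (Option (String × String))) (resolved_specs : List (List (String × String))) : Decidable (Pre_merge_direct_and_resolved_specs_py direct_specs resolved_specs) := by unfold Pre_merge_direct_and_resolved_specs_py; infer_instance

def pvWitness_merge_direct_and_resolved_specs_py : (List (Option (String × String))) × (List (List (String × String))) :=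
  ([some ("hi ", "en"), none, some ("there", "en")], [[("ni hao", "zh"), ("", "en")]])

def Spec_merge_direct_and_resolved_specs_py (direct_specs : List (Option (String × String))) (resolved_specs : List (List (String × String))) (out : List String × List String) : Prop := out = merge_direct_and_resolved_specs_py_alt direct_specs resolved_specs
instance (direct_specs : List (Option (String × String))) (resolved_specs : List (List (String × String))) (out : List String × List String) : Decidable (Spec_merge_direct_and_resolved_specs_py direct_specs resolved_specs out) := by unfold Spec_merge_direct_and_resolved_specs_py; infer_instance

-- ===== CLAIM (what is proved, stated in full; the proofs are below) =====
def Claim_equal_merge_direct_and_resolved_specs_py : Prop := ∀ (direct_specs : List (Option (String × String))) (resolved_specs : List (List (String × String))), Dom_merge_direct_and_resolved_specs_py direct_specs resolved_specs → Pre_merge_direct_and_resolved_specs_py direct_specs resolved_specs → Spec_merge_direct_and_resolved_specs_py direct_specs resolved_specs (merge_direct_and_resolved_specs_py direct_specs resolved_specs)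

-- ===== LEMMAS AND PROOFS =====

-- Proof-side abstraction: the list of maximal same-language runs, built from the right.
def pvGroupRuns : List (String × String) → List (List (String × String))
  | [] => []
  | x :: xs =>
    match pvGroupRuns xs with
    | (y :: g) :: gs => if x.2 == y.2 then (x :: y :: g) :: gs else [x] :: (y :: g) :: gs
    | gs => [x] :: gs

def pvLangOf (g : List (String × String)) : String := (g.headD ("", "")).2

-- One-step unfolding of pvGroupRuns on a cons.
theorem pvGroupRuns_cons (x : String × String) (xs : List (String × String)) :
    pvGroupRuns (x :: xs) =
      (match pvGroupRuns xs with
       | (y :: g) :: gs => if x.2 == y.2 then (x :: y :: g) :: gs else [x] :: (y :: g) :: gs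
       | gs => [x] :: gs) := rfl

-- pvGroupRuns on a cons: head group starts with the cons'd element, and the group
-- structure does not depend on the element's text, only on its key.
theorem pv_groupRuns_shape (l : String) (F : List (String × String)) :
    ∃ g gs, ∀ t : String, pvGroupRuns ((t, l) :: F) = ((t, l) :: g) :: gs := by
  cases hF : pvGroupRuns F with
  | nil => exact ⟨[], [], fun t => by simp [pvGroupRuns, hF]⟩
  | cons g0 gs0 =>
    cases g0 with
    | nil => exact ⟨[], [] :: gs0, fun t => by simp [pvGroupRuns, hF]⟩
    | cons y g1 =>
      by_cases hkey : l = y.2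
      · exact ⟨y :: g1, gs0, fun t => by simp [pvGroupRuns, hF, hkey]⟩
      · exact ⟨[], (y :: g1) :: gs0, fun t => by simp [pvGroupRuns, hF, hkey]⟩

-- Merging two leading same-key elements into one changes neither the joined texts
-- nor the language list of the groups.
theorem pv_groupRuns_merge_head (t t' l : String) (F : List (String × String)) :
    (pvGroupRuns ((t ++ t', l) :: F)).map pvJoinB = (pvGroupRuns ((t, l) :: (t', l) :: F)).map pvJoinB ∧
    (pvGroupRuns ((t ++ t', l) :: F)).map pvLangOf = (pvGroupRuns ((t, l) :: (t', l) :: F)).map pvLangOf := by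
  obtain ⟨g, gs, hshape⟩ := pv_groupRuns_shape l F
  have h1 : pvGroupRuns ((t, l) :: (t', l) :: F) = ((t, l) :: (t', l) :: g) :: gs := by
    rw [pvGroupRuns_cons, hshape t']
    simp
  rw [hshape (t ++ t'), h1]
  constructor
  · simp [pvJoinB]
  · simp [pvLangOf]

-- A-side loop invariant: A's segment loop with a nonempty accumulator equals the
-- done groups plus the grouping of the pending element consed onto the filtered rest.
theorem pv_loop_group (fs : List (String × String)) :
    ∀ (ts ls : List String) (t l : String),
    List.foldl pvStepA (ts ++ [t], ls ++ [l]) fs =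
      (ts ++ (pvGroupRuns ((t, l) :: fs.filter (fun p => p.1 ≠ ""))).map pvJoinB,
       ls ++ (pvGroupRuns ((t, l) :: fs.filter (fun p => p.1 ≠ ""))).map pvLangOf) := by
  induction fs with
  | nil =>
    intro ts ls t l
    simp [pvGroupRuns, pvJoinB, pvLangOf]
  | cons hd tl ih =>
    intro ts ls t l
    obtain ⟨t', l'⟩ := hd
    have hfilt := List.filter_cons (p := fun p : String × String => decide (p.1 ≠ "")) (x := (t', l')) (xs := tl)
    by_cases ht : t' = ""
    · -- empty text: A skips it, the filter drops it
      rw [List.foldl_cons]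
      have hskip : pvStepA (ts ++ [t], ls ++ [l]) (t', l') = (ts ++ [t], ls ++ [l]) := by
        simp [pvStepA, ht]
      rw [hskip, ih, hfilt]
      simp [ht]
    · have hkeep : List.filter (fun p : String × String => decide (p.1 ≠ "")) ((t', l') :: tl)
          = (t', l') :: List.filter (fun p : String × String => decide (p.1 ≠ "")) tl := by
        rw [hfilt]; simp [ht]
      by_cases hl : l' = l
      · -- same language: A extends the pending text, grouping merges the two heads
        subst hl
        have hstep : pvStepA (ts ++ [t], ls ++ [l']) (t', l') = (ts ++ [t ++ t'], ls ++ [l']) := by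
          simp [pvStepA, ht]
        obtain ⟨hj, hg⟩ := pv_groupRuns_merge_head t t' l' (tl.filter (fun p => p.1 ≠ ""))
        rw [List.foldl_cons, hstep, ih, hkeep]
        rw [hj, hg]
      · -- new language: A closes the pending group and starts a new one
        have hlne : ¬ (l = l') := fun h => hl h.symm
        have hstep : pvStepA (ts ++ [t], ls ++ [l]) (t', l') =
            ((ts ++ [t]) ++ [t'], (ls ++ [l]) ++ [l']) := by
          simp [pvStepA, ht, hlne]
        obtain ⟨g, gs, hshape⟩ := pv_groupRuns_shape l' (tl.filter (fun p => p.1 ≠ ""))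
        have hnew : pvGroupRuns ((t, l) :: (t', l') :: tl.filter (fun p => p.1 ≠ "")) =
            [(t, l)] :: ((t', l') :: g) :: gs := by
          rw [pvGroupRuns_cons, hshape t']
          simp [hlne]
        rw [List.foldl_cons, hstep, ih, hkeep, hnew, hshape t']
        simp [pvJoinB, pvLangOf, List.append_assoc]

-- A's segment loop from the empty accumulator.
theorem pv_loop_group0 (fs : List (String × String)) :
    List.foldl pvStepA ([], []) fs =
      ((pvGroupRuns (fs.filter (fun p => p.1 ≠ ""))).map pvJoinB,
       (pvGroupRuns (fs.filter (fun p => p.1 ≠ ""))).map pvLangOf) := by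
  induction fs with
  | nil => simp [pvGroupRuns]
  | cons hd tl ih =>
    obtain ⟨t, l⟩ := hd
    have hfilt := List.filter_cons (p := fun p : String × String => decide (p.1 ≠ "")) (x := (t, l)) (xs := tl)
    by_cases ht : t = ""
    · rw [List.foldl_cons]
      have hskip : pvStepA ([], []) (t, l) = ([], []) := by simp [pvStepA, ht]
      rw [hskip, ih, hfilt]
      simp [ht]
    · have hstep : pvStepA ([], []) (t, l) = ([] ++ [t], [] ++ [l]) := by
        simp [pvStepA, ht]
      rw [List.foldl_cons, hstep, pv_loop_group tl [] [] t l, hfilt]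
      simp [ht]

-- A's flattening loop equals B's iterator-consuming flattening, under Pre_.
theorem pv_flatA_eq_flatB :
    ∀ (direct : List (Option (String × String))) (acc : List (String × String))
      (done rem : List (List (String × String))),
    direct.countP (fun s => s.isNone) ≤ rem.length →
    (direct.foldl (pvStepFlatA (done ++ rem)) (acc, (done.length : Int))).1 = acc ++ pvFlatB direct rem := by
  intro direct
  induction direct with
  | nil => intro acc done rem _; simp [pvFlatB]
  | cons hd tl ih =>
    intro acc done rem hcount
    cases hd with
    | some s =>
      rw [List.foldl_cons]
      have hstep : pvStepFlatA (done ++ rem) (acc, (done.length : Int)) (some s) = (acc ++ [s], (done.length : Int)) := rfl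
      rw [hstep, ih (acc ++ [s]) done rem (by simpa using hcount)]
      simp [pvFlatB]
    | none =>
      cases rem with
      | nil => simp at hcount
      | cons r rs =>
        rw [List.foldl_cons]
        have hget : PySem.List.pyGet? (done ++ r :: rs) (done.length : Int) = some r := by
          rw [PySem.List.pyGet?_natCast]
          rw [List.getElem?_append_right (le_refl done.length)]
          simp
        have hstep : pvStepFlatA (done ++ r :: rs) (acc, (done.length : Int)) none
            = (acc ++ r, (done.length : Int) + 1) := by
          simp [pvStepFlatA, hget]
        rw [hstep]
        have hlen : ((done.length : Int) + 1) = (((done ++ [r]).length : Nat) : Int) := by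
          simp
        have hre : done ++ r :: rs = (done ++ [r]) ++ rs := by simp
        rw [hlen, hre, ih (acc ++ r) (done ++ [r]) rs (by simp at hcount; omega)]
        simp [pvFlatB]

-- pvScanJ lands one past the maximal run of key-matching elements.
theorem pvScanJ_eq (segs : List (String × String)) (key : String) (j : Nat) :
    pvScanJ segs key j = j + ((segs.drop j).takeWhile (fun y => y.2 == key)).length := by
  induction j using pvScanJ.induct segs key with
  | case1 j h ih =>
    obtain ⟨hj, hkey⟩ := h
    have hdrop : segs.drop j = segs[j] :: segs.drop (j + 1) := List.drop_eq_getElem_cons hj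
    have hget : segs.getD j ("", "") = segs[j] := List.getD_eq_getElem segs ("", "") hj
    rw [pvScanJ, dif_pos ⟨hj, hkey⟩, ih, hdrop, List.takeWhile_cons]
    rw [hget] at hkey
    simp only [hkey, if_true]
    simp
    omega
  | case2 j h =>
    rw [pvScanJ, dif_neg h]
    by_cases hj : j < segs.length
    · have hdrop : segs.drop j = segs[j] :: segs.drop (j + 1) := List.drop_eq_getElem_cons hj
      have hget : segs.getD j ("", "") = segs[j] := List.getD_eq_getElem segs ("", "") hj
      have hkey : ¬ ((segs[j].2 == key) = true) := by
        intro hk; exact h ⟨hj, by rw [hget]; exact hk⟩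
      rw [hdrop, List.takeWhile_cons]
      simp [hkey]
    · rw [List.drop_eq_nil_of_le (by omega)]
      simp

-- run decomposition of pvGroupRuns: the head group is the maximal head run.
theorem pvGroupRuns_run_decomp (xs : List (String × String)) :
    ∀ x : String × String,
    pvGroupRuns (x :: xs) =
      (x :: xs.takeWhile (fun y => y.2 == x.2)) :: pvGroupRuns (xs.dropWhile (fun y => y.2 == x.2)) := by
  induction xs with
  | nil => intro x; simp [pvGroupRuns]
  | cons y ys ih =>
    intro x
    rw [pvGroupRuns_cons, ih y]
    by_cases hkey : x.2 = y.2
    · have hbeq : (x.2 == y.2) = true := by simp [hkey]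
      simp only [hbeq, if_true]
      rw [List.takeWhile_cons, List.dropWhile_cons]
      have hyb : (y.2 == x.2) = true := by simp [hkey]
      simp only [hyb, if_true]
      have hfun : (fun z : String × String => z.2 == y.2) = (fun z : String × String => z.2 == x.2) := by
        funext z; rw [hkey]
      rw [hfun]
    · have hxb : (x.2 == y.2) = false := by simp [hkey]
      have hyb : (y.2 == x.2) = false := by
        simp only [beq_eq_false_iff_ne, ne_eq]
        intro hk; exact hkey hk.symm
      rw [List.takeWhile_cons, List.dropWhile_cons]
      simp only [hxb, hyb, Bool.false_eq_true, if_false]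
      rw [ih y]

-- take/drop at the takeWhile boundary recover takeWhile/dropWhile.
theorem pv_take_tw {a : Type} (p : a -> Bool) (l : List a) : l.take (l.takeWhile p).length = l.takeWhile p := by
  induction l with
  | nil => simp
  | cons x l ih => by_cases h : p x <;> simp [List.takeWhile_cons, h, ih]

theorem pv_drop_tw {a : Type} (p : a -> Bool) (l : List a) : l.drop (l.takeWhile p).length = l.dropWhile p := by
  induction l with
  | nil => simp
  | cons x l ih => by_cases h : p x <;> simp [List.takeWhile_cons, List.dropWhile_cons, h, ih]

-- B's outer loop, started at i, emits exactly the runs of the suffix segs.drop i.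
theorem pvOuter_eq_groups_aux (segs : List (String × String)) :
    ∀ (n i : Nat) (ts ls : List String), segs.length - i ≤ n →
    pvOuter segs i ts ls =
      (ts ++ (pvGroupRuns (segs.drop i)).map pvJoinB, ls ++ (pvGroupRuns (segs.drop i)).map pvLangOf) := by
  intro n
  induction n with
  | zero =>
    intro i ts ls hn
    rw [pvOuter, dif_neg (by omega), List.drop_eq_nil_of_le (by omega)]
    simp [pvGroupRuns]
  | succ n ih =>
    intro i ts ls hn
    by_cases hi : i < segs.length
    · have hget : segs.getD i ("", "") = segs[i] := List.getD_eq_getElem segs ("", "") hi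
      have hdrop : segs.drop i = segs[i] :: segs.drop (i + 1) := List.drop_eq_getElem_cons hi
      have hscan : pvScanJ segs (segs.getD i ("", "")).2 i
          = (i + 1) + ((segs.drop (i + 1)).takeWhile (fun y => y.2 == segs[i].2)).length := by
        rw [hget, pvScanJ_eq, hdrop, List.takeWhile_cons]
        simp
        omega
      have hslice : PySem.List.slice segs (some (i : Int)) (some ((pvScanJ segs (segs.getD i ("", "")).2 i : Nat) : Int))
          = segs[i] :: (segs.drop (i + 1)).takeWhile (fun y => y.2 == segs[i].2) := by
        rw [PySem.List.slice_natCast, hscan, hdrop]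
        have h1 : (i + 1) + ((segs.drop (i + 1)).takeWhile (fun y => y.2 == segs[i].2)).length - i
            = ((segs.drop (i + 1)).takeWhile (fun y => y.2 == segs[i].2)).length + 1 := by omega
        rw [h1, List.take_succ_cons, pv_take_tw]
      have hdropj : segs.drop (pvScanJ segs (segs.getD i ("", "")).2 i)
          = (segs.drop (i + 1)).dropWhile (fun y => y.2 == segs[i].2) := by
        rw [hscan, ← List.drop_drop, pv_drop_tw]
      have hgr : pvGroupRuns (segs.drop i)
          = (segs[i] :: (segs.drop (i + 1)).takeWhile (fun y => y.2 == segs[i].2))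
            :: pvGroupRuns ((segs.drop (i + 1)).dropWhile (fun y => y.2 == segs[i].2)) := by
        rw [hdrop, pvGroupRuns_run_decomp]
      rw [pvOuter, dif_pos hi]
      show pvOuter segs (pvScanJ segs (segs.getD i ("", "")).2 i)
            (ts ++ [pvJoinB (PySem.List.slice segs (some (i : Int)) (some ((pvScanJ segs (segs.getD i ("", "")).2 i : Nat) : Int)))])
            (ls ++ [(segs.getD i ("", "")).2]) = _
      rw [ih _ _ _ (by have := pvScanJ_start_succ_le segs i hi; omega)]
      rw [hslice, hdropj, hgr]
      simp [pvLangOf, hget, List.append_assoc, List.getElem?_eq_getElem hi]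
    · rw [pvOuter, dif_neg hi, List.drop_eq_nil_of_le (by omega)]
      simp [pvGroupRuns]

theorem pvOuter_eq_groups (segs : List (String × String)) (i : Nat) (ts ls : List String) :
    pvOuter segs i ts ls =
      (ts ++ (pvGroupRuns (segs.drop i)).map pvJoinB, ls ++ (pvGroupRuns (segs.drop i)).map pvLangOf) :=
  pvOuter_eq_groups_aux segs segs.length i ts ls (by omega)

-- ===== VERDICT (by name: the statement is the Claim_ definition above) =====
theorem merge_direct_and_resolved_specs_py_spec : Claim_equal_merge_direct_and_resolved_specs_py := by
  intro direct_specs resolved_specs _ hpre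
  unfold Spec_merge_direct_and_resolved_specs_py
  unfold merge_direct_and_resolved_specs_py merge_direct_and_resolved_specs_py_alt
  have hflat := pv_flatA_eq_flatB direct_specs [] [] resolved_specs hpre
  simp only [List.nil_append, List.length_nil, Nat.cast_zero] at hflat
  simp only [hflat, pv_loop_group0, pvOuter_eq_groups, List.drop_zero, List.nil_append]
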